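-- pv_equiv track=rewrite | github.com/xingyuanzhao-project/ai_policy | scripts/export_ner_bill_summary.py | count_non_null_values
-- ===== SOURCE A (Python) =====
-- from collections import Counter
--
-- def count_non_null_values(values: object) -> dict[str, int]:
--     """Count non-empty strings and return a stable dict."""
--     counter: Counter[str] = Counter()
--     for value in values:
--         if value is None:
--             continue
--         normalized_value = value.strip()
--         if not normalized_value:
--             continue
--         counter[normalized_value] += 1
--     return dict(sorted(counter.items()))
-- ===== SOURCE B (Python) =====
-- def count_non_null_values(values: object) -> dict[str, int]:
--     """Count non-empty strings and return a stable dict.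
--
--     Sort-and-scan alternative: collect the normalized strings, sort them,
--     then walk consecutive equal runs instead of hashing into a Counter.
--     """
--     normalized = []
--     for value in values:
--         if value is None:
--             continue
--         s = value.strip()
--         if not s:
--             continue
--         normalized.append(s)
--     normalized.sort()
--     result = {}
--     i = 0
--     n = len(normalized)
--     while i < n:
--         j = i
--         while j < n and normalized[j] == normalized[i]:
--             j += 1
--         result[normalized[i]] = j - i
--         i = j
--     return result
-- ===== Notes on version B (the rewrite author's own statement) =====
-- stated objective: alternative
-- what changed: Replaces the hash Counter plus sort of its items by collecting the normalized strings, sorting the occurrences themselves, and emitting one (key, run-length) pair per consecutive equal run of the sorted list.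
import Mathlib
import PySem

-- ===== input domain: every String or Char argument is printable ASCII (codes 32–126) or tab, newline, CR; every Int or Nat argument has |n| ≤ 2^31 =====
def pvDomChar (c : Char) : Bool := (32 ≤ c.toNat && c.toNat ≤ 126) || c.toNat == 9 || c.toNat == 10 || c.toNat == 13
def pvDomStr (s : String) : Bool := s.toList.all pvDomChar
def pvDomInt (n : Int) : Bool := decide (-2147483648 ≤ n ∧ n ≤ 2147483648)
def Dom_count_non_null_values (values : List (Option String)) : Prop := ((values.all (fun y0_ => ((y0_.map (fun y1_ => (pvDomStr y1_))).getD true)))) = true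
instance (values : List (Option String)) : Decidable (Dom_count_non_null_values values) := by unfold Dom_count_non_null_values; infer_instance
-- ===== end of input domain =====

-- B replaces the hash Counter + sort of its items by sorting the normalized occurrences and scanning consecutive equal runs (alternative decomposition, similar cost).

-- ===== PORT A =====
def count_non_null_values (values : List (Option String)) : List (String × Int) :=
  let counter : PySem.Dict String Int := values.foldl (fun counter value =>
    match value with
    | none => counter
    | some v =>
      let normalized_value := PySem.Str.strip v
      if normalized_value = "" then counter
      else counter.modify normalized_value 0 (· + 1)) PySem.Dict.empty
  (PySem.Dict.ofList (PySem.List.sorted2 counter.items Prod.fst Prod.snd)).items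

-- ===== PORT B =====
-- consecutive-equal-run scan of a list (the two nested index loops of Source B, as structural recursion)
def pyRuns (s : List String) : List (String × Int) :=
  match s with
  | [] => []
  | x :: t =>
    (x, 1 + ((t.takeWhile (fun y => y == x)).length : Int)) :: pyRuns (t.dropWhile (fun y => y == x))
termination_by s.length
decreasing_by
  exact Nat.lt_succ_of_le (List.length_dropWhile_le _ _)

def count_non_null_values_alt (values : List (Option String)) : List (String × Int) :=
  let normalized := values.foldl (fun acc value =>
    match value with
    | none => acc
    | some v =>
      let s := PySem.Str.strip v
      if s = "" then acc
      else acc ++ [s]) []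
  pyRuns (PySem.List.sorted normalized (fun x => x) false)

-- ===== PRECONDITION & SPEC =====
def Spec_count_non_null_values (values : List (Option String)) (out : List (String × Int)) : Prop := out = count_non_null_values_alt values
instance (values : List (Option String)) (out : List (String × Int)) : Decidable (Spec_count_non_null_values values out) := by unfold Spec_count_non_null_values; infer_instance

-- ===== CLAIM (what is proved, stated in full; the proofs are below) =====
def Claim_equal_count_non_null_values : Prop := ∀ (values : List (Option String)), Dom_count_non_null_values values → Spec_count_non_null_values values (count_non_null_values values)

-- ===== LEMMAS AND PROOFS =====

-- the list of normalized non-empty strings both loops effectively run over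
def normList (values : List (Option String)) : List String :=
  values.filterMap (fun value => value.bind (fun v =>
    let s := PySem.Str.strip v
    if s = "" then none else some s))

-- both ports' skip-None/skip-empty loop is a fold over normList
theorem foldl_skip {β : Type} (op : β → String → β) (values : List (Option String)) (init : β) :
    values.foldl (fun acc value =>
      match value with
      | none => acc
      | some v =>
        let s := PySem.Str.strip v
        if s = "" then acc else op acc s) init
    = (normList values).foldl op init := by
  induction values generalizing init with
  | nil => rfl
  | cons v t ih =>
    cases v with
    | none => simpa [normList] using ih init
    | some s =>
      by_cases h : PySem.Str.strip s = "" <;>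
        simp [normList, h] at * <;> exact ih _

theorem insertBy_congr {α : Type} (f g : α → α → Bool) (x : α) (ys : List α)
    (h : ∀ y ∈ ys, f x y = g x y) :
    PySem.List.insertBy f x ys = PySem.List.insertBy g x ys := by
  induction ys with
  | nil => rfl
  | cons y t ih =>
    simp only [PySem.List.insertBy]
    rw [h y (by simp)]
    by_cases hg : g x y = true <;> simp [hg, ih (fun z hz => h z (by simp [hz]))]

theorem foldl_insertBy_congr {α : Type} (f g : α → α → Bool) (xs acc : List α)
    (h : ∀ x ∈ xs, ∀ y, (y ∈ acc ∨ y ∈ xs) → f x y = g x y) :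
    xs.foldl (fun a x => PySem.List.insertBy f x a) acc
      = xs.foldl (fun a x => PySem.List.insertBy g x a) acc := by
  induction xs generalizing acc with
  | nil => rfl
  | cons x t ih =>
    simp only [List.foldl_cons]
    rw [insertBy_congr f g x acc (fun y hy => h x (by simp) y (Or.inl hy))]
    exact ih _ (fun z hz y hy => h z (by simp [hz]) y (by
      rcases hy with hy | hy
      · rw [PySem.List.mem_insertBy] at hy
        rcases hy with rfl | hy
        · exact Or.inr (by simp)
        · exact Or.inl hy
      · exact Or.inr (by simp [hy])))

-- sorted2 with pairwise-distinct first keys is sorting by the first key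
theorem sorted2_fst_of_nodup (xs : List (String × Int))
    (h : (xs.map Prod.fst).Nodup) :
    PySem.List.sorted2 xs Prod.fst Prod.snd false = PySem.List.sorted xs Prod.fst false := by
  have hinj := List.inj_on_of_nodup_map h
  simp only [PySem.List.sorted2, PySem.List.sorted, if_neg (by simp : ¬ (false = true))]
  apply foldl_insertBy_congr
  intro a ha b hb
  rcases hb with hb | hb
  · cases hb
  · by_cases hab : a = b
    · subst hab; simp
    · have hne : a.1 ≠ b.1 := fun e => hab (hinj ha hb e)
      rcases lt_or_gt_of_ne hne with hlt | hgt
      · simp [hlt]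
      · simp [not_lt_of_gt hgt, hgt]

-- the canonical result: distinct keys in sorted order, each with its count
def canon (L : List String) : List (String × Int) :=
  (PySem.List.sorted (PySem.Set.ofList L) (fun x => x) false).map
    (fun k => (k, (L.count k : Int)))

theorem canon_pairwise_lt (L : List String) :
    (canon L).Pairwise (fun a b => a.1 < b.1) := by
  have := PySem.List.sorted_ofList_pairwise_lt (xs := L)
  unfold canon
  exact List.pairwise_map.mpr (by simpa using this)

theorem canon_fst_nodup (L : List String) : ((canon L).map Prod.fst).Nodup := by
  have h := canon_pairwise_lt L
  have : ((canon L).map Prod.fst).Pairwise (· < ·) := List.pairwise_map.mpr h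
  exact this.imp ne_of_lt

theorem loopA (values : List (Option String)) :
    (values.foldl (fun counter value =>
      match value with
      | none => counter
      | some v =>
        let normalized_value := PySem.Str.strip v
        if normalized_value = "" then counter
        else counter.modify normalized_value 0 (· + 1)) (PySem.Dict.empty : PySem.Dict String Int))
    = PySem.Dict.counter (normList values) := by
  have h := foldl_skip (fun (d : PySem.Dict String Int) s => d.modify s 0 (· + 1)) values PySem.Dict.empty
  rw [PySem.Dict.counter_eq_foldl]
  exact h

theorem loopB (values : List (Option String)) :
    (values.foldl (fun acc value =>
      match value with
      | none => acc
      | some v =>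
        let s := PySem.Str.strip v
        if s = "" then acc
        else acc ++ [s]) [])
    = normList values := by
  rw [foldl_skip (fun acc s => acc ++ [s]) values []]
  simpa using PySem.List.foldl_append_singleton_eq_self (l := normList values) (acc := [])

-- ===== A-side =====

theorem a_side (L : List String) :
    (PySem.Dict.ofList (PySem.List.sorted2
        ((PySem.Dict.counter L).items) Prod.fst Prod.snd)).items = canon L := by
  rw [PySem.Dict.items_counter]
  rw [sorted2_fst_of_nodup _ (by
    have h2 : List.map Prod.fst
        ((PySem.Set.ofList L).map (fun k => (k, (List.count k L : Int))))
        = PySem.Set.ofList L := by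
      simp [Function.comp_def]
    rw [h2]
    exact PySem.Set.nodup_ofList L)]
  rw [PySem.List.sorted_eq_of_perm_of_pairwise_lt _ (canon L) Prod.fst
    ((PySem.List.sorted_perm (PySem.Set.ofList L) (fun x => x) false).map _)
    (canon_pairwise_lt L)]
  have h := PySem.Dict.items_foldl_insert_fresh (canon L) Prod.fst Prod.snd PySem.Dict.empty
    (fun a _ => rfl) (canon_fst_nodup L)
  simpa [PySem.Dict.ofList, PySem.Dict.update] using h

-- ===== B-side =====

theorem foldl_add_ex {α : Type} [BEq α] [LawfulBEq α] :
    ∀ (xs : List α) (acc : List α),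
      ∃ t, xs.foldl PySem.Set.add acc = acc ++ t ∧ t.Sublist xs := by
  intro xs
  induction xs with
  | nil => exact fun acc => ⟨[], by simp⟩
  | cons x xs ih =>
    intro acc
    by_cases hx : x ∈ acc
    · obtain ⟨t, h1, h2⟩ := ih acc
      exact ⟨t, by simpa [PySem.Set.add_of_mem hx] using h1, h2.cons _⟩
    · obtain ⟨t, h1, h2⟩ := ih (acc ++ [x])
      exact ⟨x :: t, by simpa [PySem.Set.add_of_not_mem hx] using h1, h2.cons₂ _⟩

theorem ofList_sublist {α : Type} [BEq α] [LawfulBEq α] (xs : List α) :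
    (PySem.Set.ofList xs).Sublist xs := by
  obtain ⟨t, h1, h2⟩ := foldl_add_ex xs []
  rw [PySem.Set.ofList_eq_foldl]
  simpa [h1] using h2

theorem dropWhile_ne (x : String) :
    ∀ (t : List String), (∀ y ∈ t, x ≤ y) → t.Pairwise (· ≤ ·) →
      ∀ y ∈ t.dropWhile (fun y => y == x), y ≠ x := by
  intro t
  induction t with
  | nil => simp
  | cons a t ih =>
    intro hle hpw y hy
    by_cases ha : a = x
    · subst ha
      rw [List.dropWhile_cons_of_pos (by simp)] at hy
      exact ih (fun z hz => List.rel_of_pairwise_cons hpw hz)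
        (List.pairwise_cons.mp hpw).2 y hy
    · rw [List.dropWhile_cons_of_neg (by simp [ha])] at hy
      have hxa : x < a := lt_of_le_of_ne (hle a (by simp)) (fun e => ha e.symm)
      rcases List.mem_cons.mp hy with rfl | hy
      · exact ha
      · exact ne_of_gt (lt_of_lt_of_le hxa (List.rel_of_pairwise_cons hpw hy))

theorem pyRuns_eq (s : List String) (hs : s.Pairwise (· ≤ ·)) :
    pyRuns s = (PySem.Set.ofList s).map (fun k => (k, (s.count k : Int))) := by
  match s with
  | [] => simp [pyRuns, PySem.Set.ofList_nil]
  | x :: t =>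
    obtain ⟨hx, ht⟩ := List.pairwise_cons.mp hs
    have htw : ∀ y ∈ t.takeWhile (fun y => y == x), y = x :=
      fun y hy => by simpa using List.mem_takeWhile_imp hy
    have hd : ∀ y ∈ t.dropWhile (fun y => y == x), y ≠ x := dropWhile_ne x t hx ht
    have hdpw : (t.dropWhile (fun y => y == x)).Pairwise (· ≤ ·) :=
      List.Pairwise.sublist (List.dropWhile_sublist _) ht
    have ihd := pyRuns_eq (t.dropWhile (fun y => y == x)) hdpw
    have hsplit : t.takeWhile (fun y => y == x) ++ t.dropWhile (fun y => y == x) = t :=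
      List.takeWhile_append_dropWhile
    -- the head count: count x (x :: t) = 1 + |takeWhile|
    have hct : t.count x = (t.takeWhile (fun y => y == x)).length := by
      conv_lhs => rw [← hsplit]
      rw [List.count_append, List.count_eq_length.mpr (fun b hb => (htw b hb).symm),
        List.count_eq_zero.mpr (fun hmem => hd x hmem rfl)]
      simp
    have hcx : (x :: t).count x = (t.takeWhile (fun y => y == x)).length + 1 := by
      rw [List.count_cons_self, hct]
    -- the distinct keys: Set.ofList (x :: t) = x :: Set.ofList (dropWhile)
    have hf1 : List.filter (fun y => !y == x)
        (PySem.Set.ofList (t.takeWhile (fun y => y == x))) = [] :=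
      List.filter_eq_nil_iff.mpr (fun a ha => by
        have : a = x := htw a ((PySem.Set.mem_ofList _ _).mp ha)
        simp [this])
    have hf2 : List.filter (fun y => !(PySem.Set.ofList (t.takeWhile (fun y => y == x))).contains y)
        (PySem.Set.ofList (t.dropWhile (fun y => y == x)))
        = PySem.Set.ofList (t.dropWhile (fun y => y == x)) :=
      List.filter_eq_self.mpr (fun a ha => by
        have hax : a ≠ x := hd a ((PySem.Set.mem_ofList _ _).mp ha)
        have hnm : a ∉ PySem.Set.ofList (t.takeWhile (fun y => y == x)) := fun hmem =>
          hax (htw a ((PySem.Set.mem_ofList _ _).mp hmem))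
        simp [hnm])
    have hf3 : List.filter (fun y => !y == x)
        (PySem.Set.ofList (t.dropWhile (fun y => y == x)))
        = PySem.Set.ofList (t.dropWhile (fun y => y == x)) :=
      List.filter_eq_self.mpr (fun a ha => by
        simp [hd a ((PySem.Set.mem_ofList _ _).mp ha)])
    have hset : PySem.Set.ofList (x :: t)
        = x :: PySem.Set.ofList (t.dropWhile (fun y => y == x)) := by
      rw [PySem.Set.ofList_cons]
      congr 1
      conv_lhs => rw [← hsplit]
      rw [PySem.Set.ofList_append, PySem.Set.update_eq_append_filter]
      unfold PySem.Set.discard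
      rw [hf2, List.filter_append, hf1, hf3, List.nil_append]
    -- counts agree on the tail keys
    have hcount : ∀ k ∈ PySem.Set.ofList (t.dropWhile (fun y => y == x)),
        (x :: t).count k = (t.dropWhile (fun y => y == x)).count k := by
      intro k hk
      have hkx : k ≠ x := hd k ((PySem.Set.mem_ofList _ _).mp hk)
      have h1 : List.count k (x :: t) = List.count k t := by
        simp [Ne.symm hkx]
      rw [h1]
      conv_lhs => rw [← hsplit]
      rw [List.count_append, List.count_eq_zero.mpr (fun hmem => hkx (htw k hmem))]
      simp
    rw [pyRuns, ihd, hset, List.map_cons, hcx]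
    congr 1
    · congr 1
      push_cast
      ring
    · exact (List.map_congr_left (fun k hk => by rw [hcount k hk])).symm
termination_by s.length
decreasing_by exact Nat.lt_succ_of_le (List.length_dropWhile_le _ _)

theorem b_side (L : List String) :
    pyRuns (PySem.List.sorted L (fun x => x) false) = canon L := by
  rw [pyRuns_eq _ (by simpa using PySem.List.sorted_pairwise L (fun x => x))]
  have h1 : PySem.Set.ofList (PySem.List.sorted L (fun x => x) false)
      = PySem.List.sorted (PySem.Set.ofList L) (fun x => x) false := by
    symm
    apply PySem.List.sorted_eq_of_perm_of_pairwise_lt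
    · exact (List.perm_ext_iff_of_nodup (PySem.Set.nodup_ofList _)
        (PySem.Set.nodup_ofList _)).mpr (fun a => by
          simp [PySem.Set.mem_ofList, PySem.List.mem_sorted])
    · have hle : (PySem.Set.ofList (PySem.List.sorted L (fun x => x) false)).Pairwise
          (· ≤ ·) := List.Pairwise.sublist (ofList_sublist _)
          (by simpa using PySem.List.sorted_pairwise L (fun x => x))
      have hnd : (PySem.Set.ofList (PySem.List.sorted L (fun x => x) false)).Nodup :=
        PySem.Set.nodup_ofList _
      exact (hle.and hnd).imp (fun h => lt_of_le_of_ne h.1 h.2)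
  rw [h1]
  unfold canon
  exact List.map_congr_left (fun k _ => by
    rw [(PySem.List.sorted_perm L (fun x => x) false).count_eq])

-- ===== VERDICT (by name: the statement is the Claim_ definition above) =====
theorem count_non_null_values_spec : Claim_equal_count_non_null_values := by
  intro values _
  unfold Spec_count_non_null_values count_non_null_values count_non_null_values_alt
  rw [loopA, loopB, a_side, b_side]
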